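-- pv_equiv track=rewrite | github.com/JessTaDa/thundereval | app.py | parse_example_pairs
-- ===== SOURCE A (Python) =====
-- from typing import Dict, List, Optional
--
-- def parse_example_pairs(text: str) -> List[Dict[str, str]]:
--     pairs = []
--     if not text.strip():
--         return pairs
--     blocks = [b.strip() for b in text.strip().split("\n\n") if b.strip()]
--     for block in blocks:
--         lines = block.split("\n")
--         inp = next((l.replace("Input:", "").strip() for l in lines if l.startswith("Input:")), None)
--         out = next((l.replace("Output:", "").strip() for l in lines if l.startswith("Output:")), None)
--         if inp:
--             pairs.append({"input": inp, "output": out or ""})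
--     return pairs
-- ===== SOURCE B (Python) =====
-- def parse_example_pairs(text):
--     return _blocks(text.strip())
--
-- def _blocks(rest):
--     # recursive descent: cut off one "\n\n"-terminated chunk at a time
--     if rest == "":
--         return []
--     cut = rest.find("\n\n")
--     if cut < 0:
--         return _block(rest)
--     return _block(rest[:cut]) + _blocks(rest[cut + 2:])
--
-- def _block(raw):
--     b = raw.strip()
--     if b == "":
--         return []
--     inp = _field(b, "Input:")
--     if not inp:
--         return []
--     out = _field(b, "Output:")
--     return [{"input": inp, "output": out or ""}]
--
-- def _field(s, prefix):
--     # recursively peel the first line off s until one starts with prefix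
--     cut = s.find("\n")
--     line = s if cut < 0 else s[:cut]
--     if line.startswith(prefix):
--         return line.replace(prefix, "").strip()
--     if cut < 0:
--         return None
--     return _field(s[cut + 1:], prefix)
-- ===== Notes on version B (the rewrite author's own statement) =====
-- stated objective: alternative
-- what changed: Replaces A's split/list-comprehension/next()-generator pipeline with a recursive-descent parser that never calls split: it cuts the text with find() and slicing, peeling one blank-line-terminated block per recursive call and, inside a block, one line per recursive call.
import Mathlib
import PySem

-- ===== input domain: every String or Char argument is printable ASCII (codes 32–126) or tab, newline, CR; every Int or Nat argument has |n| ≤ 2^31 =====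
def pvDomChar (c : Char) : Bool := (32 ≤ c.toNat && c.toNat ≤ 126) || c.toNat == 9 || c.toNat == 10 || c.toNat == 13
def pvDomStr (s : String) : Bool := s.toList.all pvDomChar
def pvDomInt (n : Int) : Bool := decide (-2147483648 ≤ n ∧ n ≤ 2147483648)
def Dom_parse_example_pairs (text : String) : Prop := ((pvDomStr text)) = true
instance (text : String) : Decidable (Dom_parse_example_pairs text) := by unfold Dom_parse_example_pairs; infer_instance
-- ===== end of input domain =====

-- B replaces A's split/list-comprehension/next()-generator pipeline by a recursive-descent parser:
-- it never calls split, instead it cuts the text apart with find() and slicing, peeling one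
-- block (and, inside a block, one line) per recursive call; objective: alternative decomposition.

-- s.split(sep) for a nonempty literal sep (split? is none only for sep = "")
def pvSplit (s sep : String) : List String := (PySem.Str.split? s sep).getD [s]

-- ===== PORT A =====
-- next((l.replace(pre, "").strip() for l in lines if l.startswith(pre)), None)
def pvA_next (lines : List String) (pre : String) : Option String :=
  (lines.find? (fun l => PySem.Str.startswith l pre)).map
    (fun l => PySem.Str.strip (PySem.Str.replace l pre ""))

def parse_example_pairs (text : String) : List (List (String × String)) :=
  let pairs : List (List (String × String)) := []
  if PySem.Str.strip text = "" then pairs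
  else
    let blocks :=
      (((pvSplit (PySem.Str.strip text) "\n\n").map
          (fun b => PySem.Str.strip b)).filter (fun b => b ≠ ""))
    blocks.foldl (fun pairs block =>
      let lines := pvSplit block "\n"
      let inp := pvA_next lines "Input:"
      let out := pvA_next lines "Output:"
      match inp with
      | none => pairs
      | some i =>
          if i = "" then pairs
          else pairs ++ [[("input", i),
                          ("output", match out with
                                     | none => ""
                                     | some o => if o = "" then "" else o)]]) pairs

-- ===== PORT B =====
-- _field(s, prefix): peel the first line (up to find("\n")) off s until one starts with prefix
def pvField (s pre : List Char) : Option String :=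
  let cut := PySem.Chars.find s ['\n']
  let line := if cut < 0 then s else PySem.Chars.slice s none (some cut)
  if PySem.Chars.startswith line pre then
    some (String.ofList (PySem.Chars.strip (PySem.Chars.replace line pre [])))
  else if h : cut < 0 then none
  else pvField (PySem.Chars.slice s (some (cut + 1)) none) pre
termination_by s.length
decreasing_by
  have h0 : (0:Int) ≤ PySem.Chars.find s ['\n'] := by omega
  have hs : s ≠ [] := by
    intro hnil; subst hnil; simp [PySem.Chars.find, PySem.Chars.find.go] at h0
  rw [PySem.Chars.slice_eq_listSlice, PySem.List.slice_from _ (by omega)]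
  have : 1 ≤ (PySem.Chars.find s ['\n'] + 1).toNat := by omega
  have hlen : 0 < s.length := List.length_pos_iff.mpr hs
  simp only [List.length_drop]; omega

-- _block(raw)
def pvBlockB (raw : List Char) : List (List (String × String)) :=
  let b := PySem.Chars.strip raw
  if b = [] then []
  else
    match pvField b "Input:".toList with
    | none => []
    | some i =>
        if i = "" then []
        else
          let out := pvField b "Output:".toList
          [[("input", i),
            ("output", match out with
                       | none => ""
                       | some o => if o = "" then "" else o)]]

-- _blocks(rest): cut off one "\n\n"-terminated chunk at a time
def pvBlocks (s : List Char) : List (List (String × String)) :=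
  if hs : s = [] then []
  else if h : PySem.Chars.find s ['\n', '\n'] < 0 then pvBlockB s
  else
    pvBlockB (PySem.Chars.slice s none (some (PySem.Chars.find s ['\n', '\n']))) ++
      pvBlocks (PySem.Chars.slice s (some (PySem.Chars.find s ['\n', '\n'] + 2)) none)
termination_by s.length
decreasing_by
  rw [PySem.Chars.slice_eq_listSlice, PySem.List.slice_from _ (by omega)]
  have : 2 ≤ (PySem.Chars.find s ['\n', '\n'] + 2).toNat := by omega
  have hlen : 0 < s.length := List.length_pos_iff.mpr hs
  simp only [List.length_drop]; omega

def parse_example_pairs_alt (text : String) : List (List (String × String)) :=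
  pvBlocks (PySem.Str.strip text).toList

-- ===== PRECONDITION & SPEC =====
def Spec_parse_example_pairs (text : String) (out : List (List (String × String))) : Prop := out = parse_example_pairs_alt text
instance (text : String) (out : List (List (String × String))) : Decidable (Spec_parse_example_pairs text out) := by unfold Spec_parse_example_pairs; infer_instance

-- ===== CLAIM (what is proved, stated in full; the proofs are below) =====
def Claim_equal_parse_example_pairs : Prop := ∀ (text : String), Dom_parse_example_pairs text → Spec_parse_example_pairs text (parse_example_pairs text)

-- ===== LEMMAS AND PROOFS =====

theorem pv_find_go_shift (sub s : List Char) (k : Nat) :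
    PySem.Chars.find.go sub s k =
      if PySem.Chars.find.go sub s 0 < 0 then -1 else PySem.Chars.find.go sub s 0 + k := by
  induction s generalizing k with
  | nil => by_cases h : sub.isEmpty <;> simp [PySem.Chars.find.go, h]
  | cons c rest ih =>
      by_cases h : sub.isPrefixOf (c :: rest) <;> simp only [PySem.Chars.find.go, h, if_pos]
      · simp
      · rw [ih (k+1), ih 1]
        split_ifs <;> push_cast <;> omega

theorem pv_go_master (sep : List Char) (hsep : sep ≠ []) :
    ∀ n s, s.length = n → ∀ (fuel : Nat) (cur : List Char) (acc : List (List Char)),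
      s.length < fuel →
      PySem.Chars.splitOn.go sep fuel s cur acc =
        if PySem.Chars.find s sep < 0 then acc.reverse ++ [cur.reverse ++ s]
        else acc.reverse ++ (cur.reverse ++ s.take (PySem.Chars.find s sep).toNat)
               :: PySem.Chars.splitOn (s.drop ((PySem.Chars.find s sep).toNat + sep.length)) sep := by
  intro n
  induction n using Nat.strong_induction_on with
  | _ n ih =>
    intro s hn fuel cur acc hfuel
    match s, fuel with
    | s, 0 => omega
    | [], f+1 =>
        have h1 : PySem.Chars.find ([] : List Char) sep < 0 := by
          simp [PySem.Chars.find, PySem.Chars.find.go, List.isEmpty_iff, hsep]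
        simp [PySem.Chars.splitOn.go, h1]
    | c :: rest, f+1 =>
      have hlen : rest.length + 1 = n := by simpa using hn
      by_cases hp : sep.isPrefixOf (c :: rest)
      · have hfind : PySem.Chars.find (c :: rest) sep = 0 := by
          simp [PySem.Chars.find, PySem.Chars.find.go, hp]
        have hL : 1 ≤ sep.length := List.length_pos_iff.mpr hsep
        set d := (c :: rest).drop sep.length with hd
        have hdroplen : d.length < n := by
          simp only [hd, List.length_drop]; simp; omega
        rw [show PySem.Chars.splitOn.go sep (f+1) (c :: rest) cur acc =
              PySem.Chars.splitOn.go sep f d [] (cur.reverse :: acc) by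
            simp [PySem.Chars.splitOn.go, hp, hd]]
        rw [ih _ hdroplen _ rfl f [] (cur.reverse :: acc)
              (by simp only [hd, List.length_drop] at *; simp at hfuel ⊢; omega)]
        have hsplit : PySem.Chars.splitOn d sep =
            if PySem.Chars.find d sep < 0 then [d]
            else d.take (PySem.Chars.find d sep).toNat ::
                 PySem.Chars.splitOn (d.drop ((PySem.Chars.find d sep).toNat + sep.length)) sep := by
          have hdef : PySem.Chars.splitOn d sep =
              PySem.Chars.splitOn.go sep (d.length + 1) d [] [] := rfl
          rw [hdef, ih _ hdroplen _ rfl _ [] [] (by omega)]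
          split_ifs <;> simp
        rw [hfind]
        rw [show ((0:Int).toNat + sep.length) = sep.length from by simp, ← hd, hsplit]
        split_ifs <;> first | omega | simp [hd]
      · have hstep : PySem.Chars.splitOn.go sep (f+1) (c :: rest) cur acc =
            PySem.Chars.splitOn.go sep f rest (c :: cur) acc := by
          simp [PySem.Chars.splitOn.go, hp]
        have hrest : rest.length < n := by omega
        rw [hstep, ih _ hrest _ rfl f (c :: cur) acc (by omega)]
        have hfind : PySem.Chars.find (c :: rest) sep =
            if PySem.Chars.find rest sep < 0 then -1 else PySem.Chars.find rest sep + 1 := by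
          simp only [PySem.Chars.find, PySem.Chars.find.go, hp, if_neg, Bool.false_eq_true,
            not_false_iff]
          exact pv_find_go_shift sep rest 1
        rw [hfind]
        by_cases hneg : PySem.Chars.find rest sep < 0
        · simp [hneg]
        · have h0 : 0 ≤ PySem.Chars.find rest sep := by omega
          rw [if_neg hneg, if_neg (by omega), if_neg hneg]
          have htoNat : (PySem.Chars.find rest sep + 1).toNat = (PySem.Chars.find rest sep).toNat + 1 := by omega
          rw [htoNat, List.take_succ_cons,
              show (PySem.Chars.find rest sep).toNat + 1 + sep.length
                 = ((PySem.Chars.find rest sep).toNat + sep.length) + 1 from by omega,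
              List.drop_succ_cons]
          simp

theorem pv_splitOn_step (s sep : List Char) (hsep : sep ≠ []) :
    PySem.Chars.splitOn s sep =
      if PySem.Chars.find s sep < 0 then [s]
      else s.take (PySem.Chars.find s sep).toNat ::
           PySem.Chars.splitOn (s.drop ((PySem.Chars.find s sep).toNat + sep.length)) sep := by
  have hdef : PySem.Chars.splitOn s sep =
      PySem.Chars.splitOn.go sep (s.length + 1) s [] [] := rfl
  rw [hdef, pv_go_master sep hsep _ s rfl _ [] [] (by omega)]
  split_ifs <;> simp

-- char-level copy of pvA_next (proof bridge)
def pvANextC (lines : List (List Char)) (pre : List Char) : Option (List Char) :=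
  (lines.find? (fun l => PySem.Chars.startswith l pre)).map
    (fun l => PySem.Chars.strip (PySem.Chars.replace l pre []))

theorem pv_strip_ofList (s : String) :
    PySem.Str.strip s = String.ofList (PySem.Chars.strip s.toList) := by
  rw [← String.ofList_toList (s := PySem.Str.strip s), PySem.Str.toList_strip]

theorem pv_replace_empty (l pre : String) :
    PySem.Str.replace l pre "" = String.ofList (PySem.Chars.replace l.toList pre.toList []) := by
  rw [← String.ofList_toList (s := PySem.Str.replace l pre ""), PySem.Str.toList_replace]
  rfl

theorem pv_split_eq (b sep : String) (h : sep ≠ "") :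
    pvSplit b sep = (PySem.Chars.splitOn b.toList sep.toList).map String.ofList := by
  have h2 : sep.toList ≠ [] := by
    intro hc; apply h
    rw [← String.ofList_toList (s := sep), hc]
  simp [pvSplit, PySem.Str.split?, PySem.Chars.split?, List.isEmpty_iff, h2]

theorem pv_next_bridge (lines : List (List Char)) (pre : String) :
    pvA_next (lines.map String.ofList) pre = (pvANextC lines pre.toList).map String.ofList := by
  induction lines with
  | nil => simp [pvA_next, pvANextC]
  | cons l t ih =>
      have hsw : PySem.Str.startswith (String.ofList l) pre
               = PySem.Chars.startswith l pre.toList := by simp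
      by_cases h : PySem.Chars.startswith l pre.toList
      · simp [pvA_next, pvANextC, List.find?, hsw, h, pv_strip_ofList, pv_replace_empty]
      · have := ih
        simp only [pvA_next, pvANextC, List.map_cons, List.find?, hsw, h] at this ⊢
        exact this

theorem pv_field_eq (s pre : List Char) :
    pvField s pre = (pvANextC (PySem.Chars.splitOn s ['\n']) pre).map String.ofList := by
  induction hn : s.length using Nat.strong_induction_on generalizing s with
  | _ n ih =>
  subst hn
  rw [pvField, pv_splitOn_step s ['\n'] (by simp)]
  by_cases hneg : PySem.Chars.find s ['\n'] < 0
  · simp only [hneg, if_pos, if_true]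
    by_cases hsw : PySem.Chars.startswith s pre <;> simp [pvANextC, List.find?, hsw]
  · have h0 : (0:Int) ≤ PySem.Chars.find s ['\n'] := by omega
    set j := (PySem.Chars.find s ['\n']).toNat with hj
    have hline : PySem.Chars.slice s none (some (PySem.Chars.find s ['\n'])) = s.take j := by
      simp [PySem.Chars.slice_eq_listSlice, PySem.List.slice_to _ h0, hj]
    have htail : PySem.Chars.slice s (some (PySem.Chars.find s ['\n'] + 1)) none = s.drop (j + 1) := by
      rw [PySem.Chars.slice_eq_listSlice, PySem.List.slice_from _ (by omega)]
      congr 1; omega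
    have hs : s ≠ [] := by
      intro hnil; subst hnil
      simp [PySem.Chars.find, PySem.Chars.find.go] at h0
    have hrec : (s.drop (j + 1)).length < s.length := by
      have : 0 < s.length := List.length_pos_iff.mpr hs
      simp only [List.length_drop]; omega
    simp only [hneg, if_neg, if_false, hline, htail, dite_false, dif_neg]
    by_cases hsw : PySem.Chars.startswith (s.take j) pre
    · simp [pvANextC, List.find?, hsw]
    · rw [if_neg hsw]
      rw [ih _ hrec _ rfl]
      simp [pvANextC, List.find?, hsw]

-- the per-piece result of A's fold body, as a list to concatenate
def pvGA (b : String) : List (List (String × String)) :=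
  match pvA_next (pvSplit b "\n") "Input:" with
  | none => []
  | some i =>
      if i = "" then []
      else [[("input", i),
             ("output", match pvA_next (pvSplit b "\n") "Output:" with
                        | none => ""
                        | some o => if o = "" then "" else o)]]

theorem pv_piece (b : String) :
    (if PySem.Str.strip b = "" then [] else pvGA (PySem.Str.strip b)) = pvBlockB b.toList := by
  rw [pv_strip_ofList b]
  unfold pvBlockB
  set bc := PySem.Chars.strip b.toList with hbc
  by_cases h : bc = []
  · simp [h]
  · rw [if_neg (by simpa using h), if_neg h]
    unfold pvGA
    rw [pv_split_eq _ _ (by decide),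
        show ("\n" : String).toList = ['\n'] from rfl, String.toList_ofList,
        pv_next_bridge, pv_next_bridge, ← pv_field_eq, ← pv_field_eq]

theorem pv_blocks_eq (s : List Char) :
    pvBlocks s = (PySem.Chars.splitOn s ['\n', '\n']).flatMap pvBlockB := by
  induction hn : s.length using Nat.strong_induction_on generalizing s with
  | _ n ih =>
  subst hn
  rw [pvBlocks]
  by_cases hs : s = []
  · subst hs
    rw [dif_pos rfl, show PySem.Chars.splitOn ([] : List Char) ['\n', '\n'] = [[]] from rfl]
    simp [pvBlockB, show PySem.Chars.strip ([] : List Char) = [] from rfl]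
  · rw [dif_neg hs, pv_splitOn_step s _ (by simp)]
    by_cases hneg : PySem.Chars.find s ['\n', '\n'] < 0
    · simp [hneg]
    · have h0 : (0:Int) ≤ PySem.Chars.find s ['\n', '\n'] := by omega
      set j := (PySem.Chars.find s ['\n', '\n']).toNat with hj
      have hline : PySem.Chars.slice s none (some (PySem.Chars.find s ['\n', '\n'])) = s.take j := by
        simp [PySem.Chars.slice_eq_listSlice, PySem.List.slice_to _ h0, hj]
      have htail : PySem.Chars.slice s (some (PySem.Chars.find s ['\n', '\n'] + 2)) none
          = s.drop (j + 2) := by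
        rw [PySem.Chars.slice_eq_listSlice, PySem.List.slice_from _ (by omega)]
        congr 1; omega
      have hrec : (s.drop (j + 2)).length < s.length := by
        have : 0 < s.length := List.length_pos_iff.mpr hs
        simp only [List.length_drop]; omega
      rw [dif_neg hneg, if_neg hneg, hline, htail, List.flatMap_cons, ih _ hrec _ rfl]
      rfl

theorem pv_flatMap_filter {α : Type} (L : List String) (g : String → List α) :
    (((L.map (fun b => PySem.Str.strip b)).filter (fun b => b ≠ "")).flatMap g)
      = L.flatMap (fun x => if PySem.Str.strip x = "" then [] else g (PySem.Str.strip x)) := by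
  induction L with
  | nil => rfl
  | cons x t ih =>
      simp only [List.map_cons, List.filter_cons, List.flatMap_cons]
      by_cases h : PySem.Str.strip x = ""
      · rw [if_pos h]
        rw [← ih]
        simp [h]
      · rw [if_neg h]
        rw [← ih]
        simp [h]

-- ===== VERDICT (by name: the statement is the Claim_ definition above) =====
theorem parse_example_pairs_spec : Claim_equal_parse_example_pairs := by
  intro text _
  show parse_example_pairs text = parse_example_pairs_alt text
  unfold parse_example_pairs parse_example_pairs_alt
  by_cases h : PySem.Str.strip text = ""
  · rw [if_pos h, h]
    rw [show ("" : String).toList = [] from rfl, pvBlocks]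
    rfl
  · rw [if_neg h]
    have hbody : ∀ (pairs : List (List (String × String))) (block : String),
        (match pvA_next (pvSplit block "\n") "Input:" with
         | none => pairs
         | some i =>
             if i = "" then pairs
             else pairs ++ [[("input", i),
                             ("output", match pvA_next (pvSplit block "\n") "Output:" with
                                        | none => ""
                                        | some o => if o = "" then "" else o)]])
          = pairs ++ pvGA block := by
      intro pairs block
      unfold pvGA
      cases hA : pvA_next (pvSplit block "\n") "Input:" with
      | none => simp
      | some i => by_cases hi : i = "" <;> simp [hi]
    dsimp only
    have hfold :
        List.foldl (fun pairs block =>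
            match pvA_next (pvSplit block "\n") "Input:" with
            | none => pairs
            | some i =>
                if i = "" then pairs
                else pairs ++ [[("input", i),
                                ("output", match pvA_next (pvSplit block "\n") "Output:" with
                                           | none => ""
                                           | some o => if o = "" then "" else o)]])
          []
          (((pvSplit (PySem.Str.strip text) "\n\n").map
              (fun b => PySem.Str.strip b)).filter (fun b => b ≠ ""))
        = List.foldl (fun acc x => acc ++ pvGA x) []
            (((pvSplit (PySem.Str.strip text) "\n\n").map
                (fun b => PySem.Str.strip b)).filter (fun b => b ≠ "")) :=
      PySem.List.foldl_congr_mem _ _ _ _ (fun acc x _ => hbody acc x)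
    rw [hfold]
    rw [PySem.List.foldl_append_eq_flatMap]
    rw [pv_flatMap_filter]
    have hpt : ∀ x : String,
        (if PySem.Str.strip x = "" then [] else pvGA (PySem.Str.strip x)) = pvBlockB x.toList :=
      pv_piece
    rw [List.flatMap_congr (fun x _ => hpt x)]
    rw [pv_split_eq _ _ (by decide), show ("\n\n" : String).toList = ['\n', '\n'] from rfl]
    rw [List.flatMap_map]
    rw [pv_blocks_eq]
    apply List.flatMap_congr
    intro x _
    simp
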